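-- pv_equiv track=rewrite | github.com/williamseddon/testingEnv | homepage.py | guess_id_column
-- ===== SOURCE A (Python) =====
-- from typing import Optional, List, Tuple
--
-- def guess_id_column(cols: List[str]) -> Optional[str]:
--     candidates = [
--         "review_id", "reviewid", "id", "row_id", "rowid",
--         "call_id", "ticket_id", "case_id"
--     ]
--     lower_map = {c.lower(): c for c in cols}
--     for cand in candidates:
--         if cand in lower_map:
--             return lower_map[cand]
--     return None
-- ===== SOURCE B (Python) =====
-- def guess_id_column(cols):
--     candidates = [
--         "review_id", "reviewid", "id", "row_id", "rowid",
--         "call_id", "ticket_id", "case_id"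
--     ]
--     best = None  # (priority rank, original column)
--     for col in cols:
--         low = col.lower()
--         if low in candidates:
--             r = candidates.index(low)
--             if best is None or r <= best[0]:
--                 best = (r, col)
--     return best[1] if best is not None else None
-- ===== Notes on version B (the rewrite author's own statement) =====
-- stated objective: alternative
-- what changed: Inverts the traversal: instead of building a lowercase dict and probing candidates in priority order, B makes a single pass over cols keeping a best-so-far (candidate-rank, column) pair, ties resolved to the later column to match the dict's last-wins overwrite.
import Mathlib
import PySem

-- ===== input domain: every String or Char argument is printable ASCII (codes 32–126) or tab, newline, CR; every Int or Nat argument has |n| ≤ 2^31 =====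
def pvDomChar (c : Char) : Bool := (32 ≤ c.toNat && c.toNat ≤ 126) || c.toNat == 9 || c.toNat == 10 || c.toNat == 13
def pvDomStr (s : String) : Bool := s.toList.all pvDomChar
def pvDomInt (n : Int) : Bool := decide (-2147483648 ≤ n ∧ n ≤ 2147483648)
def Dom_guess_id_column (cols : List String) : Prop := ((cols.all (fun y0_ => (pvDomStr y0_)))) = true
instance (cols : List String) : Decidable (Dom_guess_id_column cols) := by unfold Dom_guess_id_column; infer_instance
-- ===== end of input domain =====

-- B replaces A's lowercase-dict-plus-priority-probe with a single pass over cols keeping the best-ranked (last on ties) match (alternative decomposition, same result).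


-- ===== PORT A =====
def pvCandidates : List String :=
  ["review_id", "reviewid", "id", "row_id", "rowid", "call_id", "ticket_id", "case_id"]

-- lower_map = {c.lower(): c for c in cols}  (dict comprehension: insert in order, last wins)
def pvLowerMap (cols : List String) : PySem.Dict String String :=
  cols.foldl (fun d c => d.insert (PySem.Str.lower c) c) PySem.Dict.empty

-- for cand in candidates: if cand in lower_map: return lower_map[cand]
def pvLoopA (cands : List String) (m : PySem.Dict String String) : Option String :=
  match cands with
  | [] => none
  | cand :: rest => if m.contains cand then m.get? cand else pvLoopA rest m

def guess_id_column (cols : List String) : Option String :=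
  pvLoopA pvCandidates (pvLowerMap cols)

-- ===== PORT B =====
-- one iteration of B's loop body: low = col.lower(); if low in candidates: r = candidates.index(low);
-- if best is None or r <= best[0]: best = (r, col)
def pvStepGen (cands : List String) (best : Option (Nat × String)) (col : String) :
    Option (Nat × String) :=
  match PySem.List.index? cands (PySem.Str.lower col) with
  | none => best
  | some r =>
    match best with
    | none => some (r, col)
    | some (br, _) => if r ≤ br then some (r, col) else best

def guess_id_column_alt (cols : List String) : Option String :=
  (cols.foldl (pvStepGen pvCandidates) none).map (·.2)

-- ===== PRECONDITION & SPEC =====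
def Spec_guess_id_column (cols : List String) (out : Option String) : Prop := out = guess_id_column_alt cols
instance (cols : List String) (out : Option String) : Decidable (Spec_guess_id_column cols out) := by unfold Spec_guess_id_column; infer_instance

-- ===== CLAIM (what is proved, stated in full; the proofs are below) =====
def Claim_equal_guess_id_column : Prop := ∀ (cols : List String), Dom_guess_id_column cols → Spec_guess_id_column cols (guess_id_column cols)

-- ===== LEMMAS AND PROOFS =====

-- last col in cols whose lowercase equals cand (what A's dict stores at key cand)
def pvLastMatch (cols : List String) (cand : String) : Option String :=
  cols.foldl (fun acc c => if PySem.Str.lower c = cand then some c else acc) none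

-- first candidate (from index i on) that has a match, together with its index and last match
def pvFirst (cands : List String) (cols : List String) (i : Nat) : Option (Nat × String) :=
  match cands with
  | [] => none
  | cand :: rest =>
    match pvLastMatch cols cand with
    | some v => some (i, v)
    | none => pvFirst rest cols (i + 1)

-- A-side: the dict comprehension's lookup IS the last-match fold
theorem get?_foldl_insert_lower (cols : List String) (cand : String)
    (d : PySem.Dict String String) :
    (cols.foldl (fun d c => d.insert (PySem.Str.lower c) c) d).get? cand =
      cols.foldl (fun acc c => if PySem.Str.lower c = cand then some c else acc) (d.get? cand) := by
  induction cols generalizing d with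
  | nil => rfl
  | cons c rest ih =>
    simp only [List.foldl_cons, ih]
    congr 1
    by_cases h : PySem.Str.lower c = cand
    · subst h; simp [PySem.Dict.get?_insert_self]
    · rw [PySem.Dict.get?_insert_of_ne _ _ (fun he => h he.symm)]
      simp [h]

theorem lowerMap_get?_eq_lastMatch (cols : List String) (cand : String) :
    (pvLowerMap cols).get? cand = pvLastMatch cols cand := by
  unfold pvLowerMap pvLastMatch
  rw [get?_foldl_insert_lower]
  simp [PySem.Dict.get?_empty]

theorem loopA_eq_pvFirst (cands cols : List String) (i : Nat) :
    pvLoopA cands (pvLowerMap cols) = (pvFirst cands cols i).map (·.2) := by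
  induction cands generalizing i with
  | nil => rfl
  | cons cand rest ih =>
    unfold pvLoopA pvFirst
    rw [PySem.Dict.contains_eq_isSome_get?, lowerMap_get?_eq_lastMatch, ih (i + 1)]
    cases pvLastMatch cols cand <;> simp

theorem lastMatch_append (cols : List String) (c cand : String) :
    pvLastMatch (cols ++ [c]) cand =
      if PySem.Str.lower c = cand then some c else pvLastMatch cols cand := by
  unfold pvLastMatch
  rw [List.foldl_append]
  rfl

theorem pvFirst_nil_cols (cands : List String) (i : Nat) : pvFirst cands [] i = none := by
  induction cands generalizing i with
  | nil => rfl
  | cons cand rest ih => unfold pvFirst; simpa [pvLastMatch] using ih (i + 1)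

theorem pvFirst_ge (cands cols : List String) (i j : Nat) (v : String)
    (h : pvFirst cands cols i = some (j, v)) : i ≤ j := by
  induction cands generalizing i with
  | nil => simp [pvFirst] at h
  | cons cand rest ih =>
    unfold pvFirst at h
    cases hm : pvLastMatch cols cand with
    | some w => rw [hm] at h; simp at h; omega
    | none => rw [hm] at h; exact le_trans (by omega) (ih (i + 1) h)

theorem pvFirst_append_not_mem (cands cols : List String) (c : String) (i : Nat)
    (h : PySem.Str.lower c ∉ cands) :
    pvFirst cands (cols ++ [c]) i = pvFirst cands cols i := by
  induction cands generalizing i with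
  | nil => rfl
  | cons cand rest ih =>
    unfold pvFirst
    rw [lastMatch_append]
    have hne : PySem.Str.lower c ≠ cand := fun he => h (by simp [he])
    rw [if_neg hne]
    cases pvLastMatch cols cand with
    | some v => rfl
    | none => exact ih (i + 1) (fun hm => h (List.mem_cons_of_mem _ hm))

theorem pvFirst_append_mem (cands cols : List String) (c : String) (i r : Nat)
    (h : PySem.List.index? cands (PySem.Str.lower c) = some r) :
    pvFirst cands (cols ++ [c]) i =
      match pvFirst cands cols i with
      | none => some (i + r, c)
      | some (j, v) => if j < i + r then some (j, v) else some (i + r, c) := by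
  induction cands generalizing i r with
  | nil => simp [PySem.List.index?_eq_idxOf?] at h
  | cons cand rest ih =>
    by_cases hc : cand = PySem.Str.lower c
    · rw [← hc, PySem.List.index?_cons_self] at h
      have hr0 : r = 0 := by injection h with h; omega
      subst hr0
      unfold pvFirst
      rw [lastMatch_append, if_pos hc.symm]
      cases hm : pvLastMatch cols cand with
      | some v => simp
      | none =>
        cases hf : pvFirst rest cols (i + 1) with
        | none => simp
        | some jv =>
          obtain ⟨j, v⟩ := jv
          have hij := pvFirst_ge rest cols (i + 1) j v hf
          simp [show ¬ j < i by omega]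
    · rw [PySem.List.index?_cons_of_ne rest hc] at h
      cases hrest : PySem.List.index? rest (PySem.Str.lower c) with
      | none => rw [hrest] at h; simp at h
      | some r' =>
        rw [hrest] at h
        simp at h
        subst h
        unfold pvFirst
        rw [lastMatch_append, if_neg (fun he => hc he.symm)]
        cases hm : pvLastMatch cols cand with
        | some v => simp [show i < i + (r' + 1) by omega]
        | none =>
          rw [ih (i + 1) r' hrest]
          have he : i + 1 + r' = i + (r' + 1) := by omega
          rw [he]

theorem foldB_eq_pvFirst (cols : List String) :
    cols.foldl (pvStepGen pvCandidates) none = pvFirst pvCandidates cols 0 := by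
  induction cols using List.reverseRecOn with
  | nil => simp [pvFirst_nil_cols]
  | append_singleton cols c ih =>
    rw [List.foldl_append, List.foldl_cons, List.foldl_nil, ih]
    unfold pvStepGen
    cases hidx : PySem.List.index? pvCandidates (PySem.Str.lower c) with
    | none =>
      have hnm : PySem.Str.lower c ∉ pvCandidates :=
        (PySem.List.index?_eq_none_iff _ _).mp hidx
      rw [pvFirst_append_not_mem _ _ _ _ hnm]
    | some r =>
      rw [pvFirst_append_mem _ _ _ _ _ hidx]
      cases hf : pvFirst pvCandidates cols 0 with
      | none => simp
      | some jv =>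
        obtain ⟨j, v⟩ := jv
        by_cases hjr : r ≤ j
        · simp [if_pos hjr]
          exact fun hlt => absurd hlt (by omega)
        · simp [if_neg hjr]
          exact fun hle => absurd hle hjr

-- ===== VERDICT (by name: the statement is the Claim_ definition above) =====
theorem guess_id_column_spec : Claim_equal_guess_id_column := by
  intro cols _
  unfold Spec_guess_id_column guess_id_column guess_id_column_alt
  rw [foldB_eq_pvFirst, loopA_eq_pvFirst pvCandidates cols 0]
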